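-- pv_equiv track=rewrite | github.com/zhang-yubo/DNA-Sequencing | Assembly/StringReconstruction.py | WalkDB
-- ===== SOURCE A (Python) =====
-- def WalkDB(patterns):
--     graph = {}
--     for p in patterns:
--         s1 = p[:-1]
--         s2 = p[1:]
--         next = graph.get(s1)
--         if next:
--             next.append(s2)
--             graph.update({s1 : next})
--         else:
--             graph.update({s1 : [s2]})
--     return graph
-- ===== SOURCE B (Python) =====
-- def WalkDB(patterns):
--     prefixes = list(dict.fromkeys(p[:-1] for p in patterns))
--     return {s: [p[1:] for p in patterns if p[:-1] == s] for s in prefixes}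
-- ===== Notes on version B (the rewrite author's own statement) =====
-- stated objective: idiomatic
-- what changed: Replaces the streaming mutate-a-dict loop by a declarative two-phase build: ordered-deduplicated prefixes via dict.fromkeys, then a dict comprehension grouping suffixes by a filtering scan per prefix.
import Mathlib
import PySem

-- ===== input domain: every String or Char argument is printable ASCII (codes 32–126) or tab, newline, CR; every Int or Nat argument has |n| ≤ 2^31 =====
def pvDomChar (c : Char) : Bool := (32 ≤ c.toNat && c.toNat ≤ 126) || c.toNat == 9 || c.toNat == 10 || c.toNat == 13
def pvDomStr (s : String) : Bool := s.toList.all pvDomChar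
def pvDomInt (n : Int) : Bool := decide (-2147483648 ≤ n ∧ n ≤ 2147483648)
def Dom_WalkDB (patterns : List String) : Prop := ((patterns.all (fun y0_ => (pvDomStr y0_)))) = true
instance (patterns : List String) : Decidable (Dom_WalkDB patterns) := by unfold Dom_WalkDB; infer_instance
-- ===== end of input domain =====

-- B replaces A's streaming dict-mutation loop by a declarative two-phase build (ordered-dedup prefixes, then group suffixes per prefix); objective: idiomatic.

-- ===== PORT A =====
def WalkDB (patterns : List String) : List (String × List String) :=
  (patterns.foldl (fun graph p =>
      let s1 := PySem.Str.slice p none (some (-1))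
      let s2 := PySem.Str.slice p (some 1) none
      match graph.get? s1 with
      | some next =>
          if next.isEmpty then graph.insert s1 [s2]   -- 'if next:' false (empty list)
          else graph.insert s1 (next ++ [s2])         -- next.append(s2); graph.update({s1: next})
      | none => graph.insert s1 [s2])
    (PySem.Dict.empty : PySem.Dict String (List String))).items

-- ===== PORT B =====
def WalkDB_alt (patterns : List String) : List (String × List String) :=
  let prefixes := PySem.List.dedup (patterns.map (fun p => PySem.Str.slice p none (some (-1))))
  prefixes.map (fun s =>
    (s, (patterns.filter (fun p => PySem.Str.slice p none (some (-1)) == s)).map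
          (fun p => PySem.Str.slice p (some 1) none)))

-- ===== PRECONDITION & SPEC =====
def Spec_WalkDB (patterns : List String) (out : List (String × List String)) : Prop := out = WalkDB_alt patterns
instance (patterns : List String) (out : List (String × List String)) : Decidable (Spec_WalkDB patterns out) := by unfold Spec_WalkDB; infer_instance

-- ===== CLAIM (what is proved, stated in full; the proofs are below) =====
def Claim_equal_WalkDB : Prop := ∀ (patterns : List String), Dom_WalkDB patterns → Spec_WalkDB patterns (WalkDB patterns)

-- ===== LEMMAS AND PROOFS =====

-- A's loop body is, extensionally, a 'modify' with default []
theorem walkdb_step_eq (d : PySem.Dict String (List String)) (p : String) :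
    (match d.get? (PySem.Str.slice p none (some (-1))) with
      | some next =>
          if next.isEmpty then d.insert (PySem.Str.slice p none (some (-1))) [PySem.Str.slice p (some 1) none]
          else d.insert (PySem.Str.slice p none (some (-1))) (next ++ [PySem.Str.slice p (some 1) none])
      | none => d.insert (PySem.Str.slice p none (some (-1))) [PySem.Str.slice p (some 1) none])
    = d.modify (PySem.Str.slice p none (some (-1))) [] (fun x => x ++ [PySem.Str.slice p (some 1) none]) := by
  have hmod : d.modify (PySem.Str.slice p none (some (-1))) [] (fun x => x ++ [PySem.Str.slice p (some 1) none])
      = d.insert (PySem.Str.slice p none (some (-1)))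
          ((d.getD (PySem.Str.slice p none (some (-1))) []) ++ [PySem.Str.slice p (some 1) none]) := rfl
  rw [hmod, PySem.Dict.getD_eq_get?_getD]
  cases h : d.get? (PySem.Str.slice p none (some (-1))) with
  | none => simp
  | some next =>
      cases hn : next.isEmpty with
      | true => simp [List.isEmpty_iff.mp hn]
      | false => simp [hn]

-- A's whole loop is a 'modify'-loop
theorem walkdb_fold_eq (l : List String) (d : PySem.Dict String (List String)) :
    l.foldl (fun graph p =>
      let s1 := PySem.Str.slice p none (some (-1))
      let s2 := PySem.Str.slice p (some 1) none
      match graph.get? s1 with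
      | some next =>
          if next.isEmpty then graph.insert s1 [s2]
          else graph.insert s1 (next ++ [s2])
      | none => graph.insert s1 [s2]) d
    = l.foldl (fun d p => d.modify (PySem.Str.slice p none (some (-1))) []
        (fun x => x ++ [PySem.Str.slice p (some 1) none])) d := by
  induction l generalizing d with
  | nil => rfl
  | cons p l ih =>
      simp only [List.foldl_cons]
      rw [walkdb_step_eq, ih]

theorem WalkDB_spec' (patterns : List String) : WalkDB patterns = WalkDB_alt patterns := by
  unfold WalkDB WalkDB_alt
  rw [walkdb_fold_eq]
  have hnd : (patterns.foldl (fun d p => d.modify (PySem.Str.slice p none (some (-1))) []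
        (fun x => x ++ [PySem.Str.slice p (some 1) none])) PySem.Dict.empty).keys.Nodup := by
    exact PySem.Dict.nodup_keys_foldl_modify_key patterns
      (fun p => PySem.Str.slice p none (some (-1))) []
      (fun _ p => fun x => x ++ [PySem.Str.slice p (some 1) none]) PySem.Dict.empty
      PySem.Dict.nodup_keys_empty
  rw [PySem.Dict.items_eq_map_keys _ hnd []]
  rw [PySem.Dict.keys_foldl_modify_key patterns
      (fun p => PySem.Str.slice p none (some (-1))) []
      (fun _ p => fun x => x ++ [PySem.Str.slice p (some 1) none]) PySem.Dict.empty]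
  have hkeys : PySem.Set.update (PySem.Dict.empty : PySem.Dict String (List String)).keys
      (patterns.map (fun p => PySem.Str.slice p none (some (-1))))
      = PySem.List.dedup (patterns.map (fun p => PySem.Str.slice p none (some (-1)))) := by
    simp [PySem.Dict.keys_empty, PySem.Set.update_nil_left, PySem.List.dedup_eq_ofList]
  rw [hkeys]
  apply List.map_congr_left
  intro c _
  have hfold :
      patterns.foldl (fun d p => d.modify (PySem.Str.slice p none (some (-1))) []
        (fun x => x ++ [PySem.Str.slice p (some 1) none])) PySem.Dict.empty
      = (patterns.map (fun p => (PySem.Str.slice p none (some (-1)), PySem.Str.slice p (some 1) none))).foldl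
          (fun d q => d.modify q.1 [] (fun x => x ++ [q.2])) PySem.Dict.empty := by
    rw [List.foldl_map]
  rw [hfold, PySem.Dict.getD_foldl_modify_append]
  simp [List.filter_map, List.map_map, Function.comp_def]

-- ===== VERDICT (by name: the statement is the Claim_ definition above) =====
theorem WalkDB_spec : Claim_equal_WalkDB := by
  intro patterns _
  exact WalkDB_spec' patterns
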